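-- pv_equiv track=rewrite | github.com/nayanika2304/BioInformatics | bioinformatics_2/week_1/overlap_graph_problem.py | overlap_graph
-- ===== SOURCE A (Python) =====
-- def prefix(pattern):
--     n = len(pattern) - 1
--     return pattern[0:n]
--
-- def suffix(pattern):
--     n = len(pattern) - 1
--     return pattern[-n:]
--
-- def overlap_graph(patterns):
--     result = {}
--     for i,pattern_1 in enumerate(patterns):
--         for j,pattern_2 in enumerate(patterns):
--             if i != j and suffix(pattern_1) == prefix(pattern_2):
--                 if pattern_1 not in result:
--                     result[pattern_1] = pattern_2
--                 else:
--                     result[pattern_1] = result[pattern_1] +',' +pattern_2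
--     return result
-- ===== SOURCE B (Python) =====
-- def prefix(pattern):
--     n = len(pattern) - 1
--     return pattern[0:n]
--
-- def suffix(pattern):
--     n = len(pattern) - 1
--     return pattern[-n:]
--
-- def overlap_graph(patterns):
--     # Index the patterns by their prefix once, then answer each suffix by lookup.
--     by_prefix = {}
--     for j, q in enumerate(patterns):
--         by_prefix.setdefault(prefix(q), []).append((j, q))
--     result = {}
--     for i, p in enumerate(patterns):
--         parts = [q for j, q in by_prefix.get(suffix(p), []) if j != i]
--         if parts:
--             joined = ','.join(parts)
--             result[p] = result[p] + ',' + joined if p in result else joined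
--     return result
-- ===== Notes on version B (the rewrite author's own statement) =====
-- stated objective: faster
-- what changed: Replaces A's nested all-pairs scan (for each pattern, rescan every other pattern comparing suffix to prefix) by building a dict indexing the enumerated patterns by their prefix once, then answering each pattern's suffix with a single dict lookup.
import Mathlib
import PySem

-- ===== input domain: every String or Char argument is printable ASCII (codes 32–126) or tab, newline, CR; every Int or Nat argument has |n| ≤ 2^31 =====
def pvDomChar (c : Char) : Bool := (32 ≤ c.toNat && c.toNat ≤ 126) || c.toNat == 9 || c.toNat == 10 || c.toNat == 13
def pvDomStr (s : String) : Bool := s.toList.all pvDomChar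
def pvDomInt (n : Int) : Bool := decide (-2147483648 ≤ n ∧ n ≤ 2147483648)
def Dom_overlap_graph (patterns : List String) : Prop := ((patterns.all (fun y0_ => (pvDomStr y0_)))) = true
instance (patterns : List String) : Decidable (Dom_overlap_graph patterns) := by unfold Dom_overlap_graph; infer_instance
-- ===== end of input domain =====

-- B replaces A's quadratic all-pairs scan by a dict indexing patterns by prefix, answering each suffix by one lookup.


-- ===== PORT A =====
def pyPrefix (pattern : String) : String :=
  let n : Int := PySem.Str.len pattern - 1
  PySem.Str.slice pattern (some 0) (some n)

def pySuffix (pattern : String) : String :=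
  let n : Int := PySem.Str.len pattern - 1
  PySem.Str.slice pattern (some (-n)) none

def overlap_graph (patterns : List String) : List (String × String) :=
  let result : PySem.Dict String String :=
    (PySem.List.enumerate patterns 0).foldl (fun result ip =>
      (PySem.List.enumerate patterns 0).foldl (fun result jq =>
        if ip.1 ≠ jq.1 ∧ pySuffix ip.2 = pyPrefix jq.2 then
          if result.contains ip.2 = false then result.insert ip.2 jq.2
          else result.insert ip.2 (result.getD ip.2 "" ++ "," ++ jq.2)
        else result) result) PySem.Dict.empty
  result.items

-- ===== PORT B =====
def overlap_graph_alt (patterns : List String) : List (String × String) :=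
  let by_prefix : PySem.Dict String (List (Int × String)) :=
    (PySem.List.enumerate patterns 0).foldl
      (fun d jq => d.modify (pyPrefix jq.2) [] (· ++ [jq])) PySem.Dict.empty
  let result : PySem.Dict String String :=
    (PySem.List.enumerate patterns 0).foldl (fun result ip =>
      let parts := ((by_prefix.getD (pySuffix ip.2) []).filter (fun jq => jq.1 != ip.1)).map (·.2)
      if parts ≠ [] then
        let joined := PySem.Str.join "," parts
        result.insert ip.2 (if result.contains ip.2 then result.getD ip.2 "" ++ "," ++ joined else joined)
      else result) PySem.Dict.empty
  result.items

-- ===== PRECONDITION & SPEC =====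
def Spec_overlap_graph (patterns : List String) (out : List (String × String)) : Prop := out = overlap_graph_alt patterns
instance (patterns : List String) (out : List (String × String)) : Decidable (Spec_overlap_graph patterns out) := by unfold Spec_overlap_graph; infer_instance

-- ===== CLAIM (what is proved, stated in full; the proofs are below) =====
def Claim_equal_overlap_graph : Prop := ∀ (patterns : List String), Dom_overlap_graph patterns → Spec_overlap_graph patterns (overlap_graph patterns)

-- ===== LEMMAS AND PROOFS =====

lemma joinComma_singleton (a : String) : PySem.Str.join "," [a] = a := by
  simp [PySem.Str.join, PySem.Chars.join, List.intercalate, String.ofList_toList]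

lemma joinComma_cons (a : String) (rest : List String) (h : rest ≠ []) :
    PySem.Str.join "," (a :: rest) = a ++ "," ++ PySem.Str.join "," rest := by
  obtain ⟨b, l, rfl⟩ : ∃ b l, rest = b :: l := by
    cases rest with
    | nil => exact absurd rfl h
    | cons b l => exact ⟨b, l, rfl⟩
  simp only [PySem.Str.join, PySem.Chars.join, List.map_cons]
  rw [show ",".toList.intercalate (a.toList :: b.toList :: List.map String.toList l)
        = a.toList ++ ",".toList ++ ",".toList.intercalate (b.toList :: List.map String.toList l) by
      simp [List.intercalate]]
  rw [String.ofList_append, String.ofList_append, String.ofList_toList]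
  rfl

-- A's inner loop over the enumerated patterns, characterised as one insert of a comma-join.
lemma innerA (i : Int) (p : String) (l : List (Int × String)) (r : PySem.Dict String String) :
    l.foldl (fun result jq =>
        if i ≠ jq.1 ∧ pySuffix p = pyPrefix jq.2 then
          if result.contains p = false then result.insert p jq.2
          else result.insert p (result.getD p "" ++ "," ++ jq.2)
        else result) r
    = (let parts := (l.filter (fun jq => decide (i ≠ jq.1 ∧ pySuffix p = pyPrefix jq.2))).map (·.2)
       if parts = [] then r
       else r.insert p (if r.contains p then r.getD p "" ++ "," ++ PySem.Str.join "," parts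
                        else PySem.Str.join "," parts)) := by
    induction l generalizing r with
  | nil => simp
  | cons jq l ih =>
    by_cases h : i ≠ jq.1 ∧ pySuffix p = pyPrefix jq.2
    · simp only [List.foldl_cons, List.filter_cons, if_pos h, decide_eq_true_eq]
      rw [ih]
      set v1 : String := if (r.contains p : Bool) = false then jq.2 else r.getD p "" ++ "," ++ jq.2 with hv1
      have hstep : (if (r.contains p : Bool) = false then r.insert p jq.2
          else r.insert p (r.getD p "" ++ "," ++ jq.2)) = r.insert p v1 := by
        by_cases hc : (r.contains p : Bool) = false <;> simp [hv1, hc]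
      rw [hstep]
      cases hm : (l.filter (fun jq => decide (i ≠ jq.1 ∧ pySuffix p = pyPrefix jq.2))).map (·.2) with
      | nil =>
        simp only [hm, List.map_cons]
        rw [if_neg (by simp : ¬ (jq.2 :: ([] : List String)) = []), joinComma_singleton]
        by_cases hc : (r.contains p : Bool) = false <;> simp [hv1, hc]
      | cons m ms =>
        simp only [hm, List.map_cons]
        rw [if_neg (by simp : ¬ (m :: ms = [])), if_neg (by simp : ¬ (jq.2 :: m :: ms = []))]
        rw [if_pos (by rw [PySem.Dict.contains_insert_self] : (r.insert p v1).contains p = true)]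
        rw [PySem.Dict.getD_insert_self, PySem.Dict.insert_insert_self]
        rw [joinComma_cons jq.2 (m :: ms) (by simp)]
        by_cases hc : (r.contains p : Bool) = false <;>
          simp [hv1, hc, String.append_assoc]
    · simp only [List.foldl_cons, List.filter_cons, decide_eq_true_eq]
      rw [if_neg h, if_neg h, ih]

lemma groupB (patterns : List String) (c : String) :
    ((PySem.List.enumerate patterns 0).foldl
        (fun d jq => d.modify (pyPrefix jq.2) [] (· ++ [jq])) PySem.Dict.empty).getD c []
      = (PySem.List.enumerate patterns 0).filter (fun jq => pyPrefix jq.2 == c) := by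
  have hfold : (PySem.List.enumerate patterns 0).foldl
        (fun d jq => d.modify (pyPrefix jq.2) [] (· ++ [jq])) PySem.Dict.empty
      = ((PySem.List.enumerate patterns 0).map (fun jq => (pyPrefix jq.2, jq))).foldl
        (fun d q => d.modify q.1 [] (· ++ [q.2])) PySem.Dict.empty := by
    rw [List.foldl_map]
  rw [hfold, PySem.Dict.getD_foldl_modify_append, PySem.Dict.getD_empty]
  rw [List.filter_map, List.map_map]
  simp [Function.comp_def]

-- ===== VERDICT (by name: the statement is the Claim_ definition above) =====
lemma parts_eq (patterns : List String) (ip : Int × String) :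
    ((((PySem.List.enumerate patterns 0).foldl
          (fun d jq => d.modify (pyPrefix jq.2) [] (· ++ [jq])) PySem.Dict.empty).getD
        (pySuffix ip.2) []).filter (fun jq => jq.1 != ip.1)).map (·.2)
    = ((PySem.List.enumerate patterns 0).filter
        (fun jq => decide (ip.1 ≠ jq.1 ∧ pySuffix ip.2 = pyPrefix jq.2))).map (·.2) := by
  rw [groupB, List.filter_filter]
  congr 1
  apply List.filter_congr
  intro jq _
  have e1 : (pyPrefix jq.2 == pySuffix ip.2) = decide (pySuffix ip.2 = pyPrefix jq.2) := by
    by_cases h : pySuffix ip.2 = pyPrefix jq.2 <;> simp [h, fun a => (Ne.symm a : pyPrefix jq.2 ≠ pySuffix ip.2)]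
  have e2 : (jq.1 != ip.1) = decide (ip.1 ≠ jq.1) := by
    by_cases h : ip.1 = jq.1 <;> simp [h, fun a => (Ne.symm a : jq.1 ≠ ip.1)]
  rw [e1, e2]
  simp

theorem overlap_graph_spec : Claim_equal_overlap_graph := by
  intro patterns _
  unfold Spec_overlap_graph overlap_graph overlap_graph_alt
  refine congrArg PySem.Dict.items ?_
  have hstep : (fun (result : PySem.Dict String String) (ip : Int × String) =>
      (PySem.List.enumerate patterns 0).foldl (fun result jq =>
        if ip.1 ≠ jq.1 ∧ pySuffix ip.2 = pyPrefix jq.2 then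
          if result.contains ip.2 = false then result.insert ip.2 jq.2
          else result.insert ip.2 (result.getD ip.2 "" ++ "," ++ jq.2)
        else result) result)
    = (fun (result : PySem.Dict String String) (ip : Int × String) =>
      let parts := ((((PySem.List.enumerate patterns 0).foldl
            (fun d jq => d.modify (pyPrefix jq.2) [] (· ++ [jq])) PySem.Dict.empty).getD
          (pySuffix ip.2) []).filter (fun jq => jq.1 != ip.1)).map (·.2)
      if parts ≠ [] then
        let joined := PySem.Str.join "," parts
        result.insert ip.2 (if result.contains ip.2 then result.getD ip.2 "" ++ "," ++ joined else joined)
      else result) := by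
    funext r ip
    rw [innerA ip.1 ip.2 (PySem.List.enumerate patterns 0) r]
    simp only [parts_eq patterns ip, ite_not]
  rw [hstep]
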